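-- pv_equiv track=rewrite | github.com/ege-john/nyc-taxi-data-analysis | tasks/task1.py | count_trips
-- ===== SOURCE A (Python) =====
-- from typing import List, Dict, Tuple
--
-- def count_trips(data: List[Dict[str, any]], zones: Dict[int, str]) -> Dict[str, int]:
--     """Counts the number of trips for each specified zone."""
--     # Initialize a dictionary to hold counts for each zone
--     zone_counts = {zone_name: 0 for zone_name in zones.values()}
--
--     # Increment counts based on pickup location
--     for trip in data:
--         try:
--             zone_id = int(trip['PULocationID'])
--             if zone_id in zones:
--                 zone_name = zones[zone_id]
--                 zone_counts[zone_name] += 1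
--         except Exception as e:
--             continue  # Skip lines with invalid data
--     return zone_counts
-- ===== SOURCE B (Python) =====
-- def count_trips(data, zones):
--     """Counts the number of trips for each specified zone.
--
--     Two-pass variant: first index trip counts by pickup location ID,
--     then collapse the ID table onto zone names."""
--     id_counts = {}
--     for trip in data:
--         try:
--             zone_id = int(trip['PULocationID'])
--             if zone_id in zones:
--                 id_counts[zone_id] = id_counts.get(zone_id, 0) + 1
--         except Exception:
--             continue
--     zone_counts = {zone_name: 0 for zone_name in zones.values()}
--     for zone_id, cnt in id_counts.items():
--         zone_counts[zones[zone_id]] += cnt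
--     return zone_counts
-- ===== Notes on version B (the rewrite author's own statement) =====
-- stated objective: alternative
-- what changed: Instead of incrementing name-keyed counts once per trip, B first builds an ID-keyed count table in one pass over the trips and then collapses that (much smaller) table onto zone names in a second pass.
import Mathlib
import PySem

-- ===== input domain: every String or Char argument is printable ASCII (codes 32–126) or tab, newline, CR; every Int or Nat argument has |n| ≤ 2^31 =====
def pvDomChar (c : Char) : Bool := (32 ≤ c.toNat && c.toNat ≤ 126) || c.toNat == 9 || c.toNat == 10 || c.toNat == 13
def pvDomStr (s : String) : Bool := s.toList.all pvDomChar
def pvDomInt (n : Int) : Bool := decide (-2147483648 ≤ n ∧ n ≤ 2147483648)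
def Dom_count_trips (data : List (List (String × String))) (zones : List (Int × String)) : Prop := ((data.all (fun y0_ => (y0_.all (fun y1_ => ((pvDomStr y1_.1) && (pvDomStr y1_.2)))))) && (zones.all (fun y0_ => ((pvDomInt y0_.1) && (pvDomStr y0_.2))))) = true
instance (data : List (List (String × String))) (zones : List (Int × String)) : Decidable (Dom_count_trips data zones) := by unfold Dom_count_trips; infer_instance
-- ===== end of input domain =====

-- B builds an ID-keyed count table in a first pass and collapses it onto zone names in a
-- second pass, instead of A's single pass incrementing name-keyed counts per trip (objective: alternative).


-- ===== PORT A =====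
-- A: one pass over data; per trip parse PULocationID, and if it is a zone id, increment
-- the name-keyed count table initialised to 0 for every zone name.
def count_trips (data : List (List (String × String))) (zones : List (Int × String)) : List (String × Int) :=
  let zonesD : PySem.Dict Int String := PySem.Dict.mk zones
  let zone_counts : PySem.Dict String Int :=
    zones.foldl (fun d p => d.insert p.2 0) PySem.Dict.empty
  let final : PySem.Dict String Int :=
    data.foldl (fun zc trip =>
      match (PySem.Dict.mk trip).get? "PULocationID" with   -- KeyError → skip (try/except)
      | none => zc
      | some s =>
        match PySem.Int.ofStr? s with                       -- ValueError → skip (try/except)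
        | none => zc
        | some zone_id =>
          if zonesD.contains zone_id then
            zc.modify (zonesD.getD zone_id "") 0 (· + 1)    -- zone_counts[zones[zone_id]] += 1
          else zc) zone_counts
  final.items

-- ===== PORT B =====
-- B: pass 1 counts trips per location ID; pass 2 starts from the zero name table and adds
-- each ID's count onto its zone name.
def count_trips_alt (data : List (List (String × String))) (zones : List (Int × String)) : List (String × Int) :=
  let zonesD : PySem.Dict Int String := PySem.Dict.mk zones
  let id_counts : PySem.Dict Int Int :=
    data.foldl (fun ic trip =>
      match (PySem.Dict.mk trip).get? "PULocationID" with   -- KeyError → skip (try/except)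
      | none => ic
      | some s =>
        match PySem.Int.ofStr? s with                       -- ValueError → skip (try/except)
        | none => ic
        | some zone_id =>
          if zonesD.contains zone_id then
            ic.modify zone_id 0 (· + 1)                     -- id_counts[zone_id] = id_counts.get(zone_id, 0) + 1
          else ic) PySem.Dict.empty
  let zone_counts : PySem.Dict String Int :=
    zones.foldl (fun d p => d.insert p.2 0) PySem.Dict.empty
  let final : PySem.Dict String Int :=
    id_counts.items.foldl (fun zc p =>
      zc.modify (zonesD.getD p.1 "") 0 (· + p.2)) zone_counts  -- zone_counts[zones[zone_id]] += cnt
  final.items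

-- ===== PRECONDITION & SPEC =====
def Spec_count_trips (data : List (List (String × String))) (zones : List (Int × String)) (out : List (String × Int)) : Prop := out = count_trips_alt data zones
instance (data : List (List (String × String))) (zones : List (Int × String)) (out : List (String × Int)) : Decidable (Spec_count_trips data zones out) := by unfold Spec_count_trips; infer_instance

-- ===== CLAIM (what is proved, stated in full; the proofs are below) =====
def Claim_equal_count_trips : Prop := ∀ (data : List (List (String × String))) (zones : List (Int × String)), Dom_count_trips data zones → Spec_count_trips data zones (count_trips data zones)

-- ===== LEMMAS AND PROOFS =====

-- the parsed, validated location ID of one trip (the shared try/except body of both loops)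
def pvToId (zones : List (Int × String)) (trip : List (String × String)) : Option Int :=
  match (PySem.Dict.mk trip).get? "PULocationID" with
  | none => none
  | some s =>
    match PySem.Int.ofStr? s with
    | none => none
    | some zone_id => if (PySem.Dict.mk zones).contains zone_id then some zone_id else none

-- A's loop is the counting loop over the validated IDs of data
theorem pvA_loop_eq (zones : List (Int × String)) (data : List (List (String × String)))
    (d : PySem.Dict String Int) :
    data.foldl (fun zc trip =>
      match (PySem.Dict.mk trip).get? "PULocationID" with
      | none => zc
      | some s =>
        match PySem.Int.ofStr? s with
        | none => zc
        | some zone_id =>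
          if (PySem.Dict.mk zones).contains zone_id then
            zc.modify ((PySem.Dict.mk zones).getD zone_id "") 0 (· + 1)
          else zc) d
    = (data.filterMap (pvToId zones)).foldl
        (fun zc i => zc.modify ((PySem.Dict.mk zones).getD i "") 0 (· + 1)) d := by
  induction data generalizing d with
  | nil => rfl
  | cons t ts ih =>
    simp only [List.foldl_cons, List.filterMap_cons]
    rcases hg : (PySem.Dict.mk t).get? "PULocationID" with _ | s
    · simp only [pvToId, hg]; exact ih d
    · rcases hi : PySem.Int.ofStr? s with _ | z
      · simp only [pvToId, hg, hi]; exact ih d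
      · by_cases h : (PySem.Dict.mk zones).contains z = true
        · simp only [pvToId, hg, hi, h, if_true, List.foldl_cons]; exact ih _
        · simp only [pvToId, hg, hi, h, if_false, Bool.false_eq_true]; exact ih d

-- B's first loop is the same counting loop keyed by the ID itself
theorem pvB_loop_eq (zones : List (Int × String)) (data : List (List (String × String)))
    (d : PySem.Dict Int Int) :
    data.foldl (fun ic trip =>
      match (PySem.Dict.mk trip).get? "PULocationID" with
      | none => ic
      | some s =>
        match PySem.Int.ofStr? s with
        | none => ic
        | some zone_id =>
          if (PySem.Dict.mk zones).contains zone_id then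
            ic.modify zone_id 0 (· + 1)
          else ic) d
    = (data.filterMap (pvToId zones)).foldl (fun ic i => ic.modify i 0 (· + 1)) d := by
  induction data generalizing d with
  | nil => rfl
  | cons t ts ih =>
    simp only [List.foldl_cons, List.filterMap_cons]
    rcases hg : (PySem.Dict.mk t).get? "PULocationID" with _ | s
    · simp only [pvToId, hg]; exact ih d
    · rcases hi : PySem.Int.ofStr? s with _ | z
      · simp only [pvToId, hg, hi]; exact ih d
      · by_cases h : (PySem.Dict.mk zones).contains z = true
        · simp only [pvToId, hg, hi, h, if_true, List.foldl_cons]; exact ih _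
        · simp only [pvToId, hg, hi, h, if_false, Bool.false_eq_true]; exact ih d

-- every validated ID is a key of zones
theorem pvMem_L (zones : List (Int × String)) (data : List (List (String × String))) (i : Int)
    (h : i ∈ data.filterMap (pvToId zones)) : (PySem.Dict.mk zones).contains i = true := by
  rcases List.mem_filterMap.mp h with ⟨t, _, ht⟩
  unfold pvToId at ht
  rcases hg : (PySem.Dict.mk t).get? "PULocationID" with _ | s
  · rw [hg] at ht; simp at ht
  rw [hg] at ht
  simp only at ht
  rcases hi : PySem.Int.ofStr? s with _ | z
  · rw [hi] at ht; simp at ht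
  rw [hi] at ht
  simp only at ht
  by_cases hc : (PySem.Dict.mk zones).contains z = true
  · rw [if_pos hc] at ht
    obtain rfl : z = i := by injection ht
    exact hc
  · rw [if_neg hc] at ht; simp at ht

-- value of a keyed accumulation loop "zc[key x] += w x"
theorem pvGetD_foldl_modify_key {κ β : Type} [BEq κ] [LawfulBEq κ] [DecidableEq κ]
    (l : List β) (key : β → κ) (w : β → Int) (d : PySem.Dict κ Int) (k : κ) :
    (l.foldl (fun zc x => zc.modify (key x) 0 (· + w x)) d).getD k 0
      = d.getD k 0 + ((l.filter (fun x => key x == k)).map w).sum := by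
  induction l generalizing d with
  | nil => simp
  | cons x xs ih =>
    simp only [List.foldl_cons, ih, List.filter_cons, PySem.Dict.getD_modify]
    by_cases h : key x = k
    · simp [h]; ring
    · simp [h, Ne.symm h]

-- updating a set with elements it already has changes nothing
theorem pvSet_update_of_subset {α : Type} [BEq α] [LawfulBEq α]
    (s : PySem.Set α) (xs : List α) (h : ∀ x ∈ xs, x ∈ s) :
    PySem.Set.update s xs = s := by
  rw [PySem.Set.update_eq_append_filter]
  have hf : (PySem.Set.ofList xs).filter (fun y => !(PySem.Set.contains s y)) = [] :=
    List.filter_eq_nil_iff.mpr (fun y hy => by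
      simpa using h y ((PySem.Set.mem_ofList xs y).mp hy))
  rw [hf, List.append_nil]

-- the zero-initialised name table has exactly the distinct zone names as keys
theorem pvInit_keys (zones : List (Int × String)) :
    (zones.foldl (fun d p => d.insert p.2 0) (PySem.Dict.empty : PySem.Dict String Int)).keys
      = PySem.Set.ofList (zones.map (·.2)) := by
  rw [PySem.Dict.keys_foldl_insert_key zones (·.2) (fun _ _ => 0) PySem.Dict.empty]
  simp [PySem.Set.update_nil_left]

-- a validated ID maps to a name of the zero-initialised table
theorem pvName_mem (zones : List (Int × String)) (i : Int)
    (h : (PySem.Dict.mk zones).contains i = true) :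
    (PySem.Dict.mk zones).getD i "" ∈ (zones.foldl (fun d p => d.insert p.2 0) (PySem.Dict.empty : PySem.Dict String Int)).keys := by
  rw [pvInit_keys]
  have hs : ((PySem.Dict.mk zones).get? i).isSome := by
    rw [← PySem.Dict.contains_eq_isSome_get?]; exact h
  rcases ho : (PySem.Dict.mk zones).get? i with _ | v
  · rw [ho] at hs; simp at hs
  · have hmem : (i, v) ∈ (PySem.Dict.mk zones).items := PySem.Dict.mem_items_of_get?_eq_some _ ho
    have hv : v ∈ zones.map (·.2) := by
      have hit : (PySem.Dict.mk zones).items = zones := rfl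
      rw [hit] at hmem
      exact List.mem_map.mpr ⟨(i, v), hmem, rfl⟩
    have hgd : (PySem.Dict.mk zones).getD i "" = v := by
      simp [PySem.Dict.getD, ho]
    rw [hgd]
    exact (PySem.Set.mem_ofList _ _).mpr hv

-- counting the matching elements = summing per-element counts over the distinct elements
theorem pvCountP_eq_sum (L : List Int) (p : Int → Bool) :
    (L.countP p : Int)
      = (((PySem.Set.ofList L).filter p).map (fun i => (L.count i : Int))).sum := by
  have hperm : L.dedup.Perm (PySem.Set.ofList L) := by
    apply (List.perm_ext_iff_of_nodup (List.nodup_dedup L) (PySem.Set.nodup_ofList L)).mpr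
    intro a; rw [List.mem_dedup, PySem.Set.mem_ofList]
  have h2 := List.sum_map_count_dedup_filter_eq_countP p L
  have h3 : ((L.dedup.filter p).map L.count).Perm (((PySem.Set.ofList L).filter p).map L.count) :=
    (hperm.filter _).map _
  calc (L.countP p : Int)
      = (((L.dedup.filter p).map L.count).sum : Int) := by rw [← h2]
    _ = ((((PySem.Set.ofList L).filter p).map L.count).sum : Int) := by rw [h3.sum_eq]
    _ = _ := by rw [Nat.cast_list_sum, List.map_map]; rfl

-- A's final dict equals B's final dict
theorem pvDict_eq (zones : List (Int × String)) (data : List (List (String × String))) :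
    ((data.filterMap (pvToId zones)).foldl
        (fun zc i => zc.modify ((PySem.Dict.mk zones).getD i "") 0 (· + 1))
        (zones.foldl (fun d p => d.insert p.2 0) PySem.Dict.empty))
    = (((PySem.Set.ofList (data.filterMap (pvToId zones))).map
          (fun k => (k, ((data.filterMap (pvToId zones)).count k : Int)))).foldl
        (fun zc p => zc.modify ((PySem.Dict.mk zones).getD p.1 "") 0 (· + p.2))
        (zones.foldl (fun d p => d.insert p.2 0) PySem.Dict.empty)) := by
  set L := data.filterMap (pvToId zones) with hL
  set nameOf : Int → String := fun i => (PySem.Dict.mk zones).getD i "" with hname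
  set init : PySem.Dict String Int := zones.foldl (fun d p => d.insert p.2 0) PySem.Dict.empty with hinit
  have hnames : ∀ x ∈ L.map nameOf, x ∈ init.keys := by
    intro x hx
    rcases List.mem_map.mp hx with ⟨i, hi, rfl⟩
    exact pvName_mem zones i (pvMem_L zones data i hi)
  have hkeysA : (L.foldl (fun zc i => zc.modify (nameOf i) 0 (· + 1)) init).keys = init.keys := by
    rw [PySem.Dict.keys_foldl_modify_key L nameOf 0 (fun _ _ => (· + 1)) init]
    exact pvSet_update_of_subset _ _ hnames
  have hkeysB : (((PySem.Set.ofList L).map (fun k => (k, (L.count k : Int)))).foldl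
      (fun zc p => zc.modify (nameOf p.1) 0 (· + p.2)) init).keys = init.keys := by
    rw [PySem.Dict.keys_foldl_modify_key ((PySem.Set.ofList L).map (fun k => (k, (L.count k : Int))))
        (fun p => nameOf p.1) 0 (fun _ p => (· + p.2)) init]
    apply pvSet_update_of_subset
    intro x hx
    rcases List.mem_map.mp hx with ⟨p, hp, rfl⟩
    rcases List.mem_map.mp hp with ⟨i, hi, rfl⟩
    exact pvName_mem zones i (pvMem_L zones data i ((PySem.Set.mem_ofList L i).mp hi))
  have hnd : init.keys.Nodup := by
    rw [hinit, pvInit_keys]; exact PySem.Set.nodup_ofList _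
  apply PySem.Dict.ext
  rw [PySem.Dict.items_eq_map_keys _ (hkeysA ▸ hnd) 0,
      PySem.Dict.items_eq_map_keys _ (hkeysB ▸ hnd) 0, hkeysA, hkeysB]
  apply List.map_congr_left
  intro k _
  have hA : (L.foldl (fun zc i => zc.modify (nameOf i) 0 (· + 1)) init).getD k 0
      = init.getD k 0 + ((L.filter (fun i => nameOf i == k)).map (fun _ => (1 : Int))).sum := by
    exact pvGetD_foldl_modify_key L nameOf (fun _ => 1) init k
  have hB : (((PySem.Set.ofList L).map (fun k => (k, (L.count k : Int)))).foldl
      (fun zc p => zc.modify (nameOf p.1) 0 (· + p.2)) init).getD k 0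
      = init.getD k 0
        + (((PySem.Set.ofList L).filter (fun i => nameOf i == k)).map (fun i => (L.count i : Int))).sum := by
    rw [pvGetD_foldl_modify_key ((PySem.Set.ofList L).map (fun k => (k, (L.count k : Int))))
        (fun p => nameOf p.1) (·.2) init k]
    congr 1
    rw [List.filter_map, List.map_map]
    rfl
  simp only [Prod.mk.injEq, true_and]
  rw [hA, hB, ← pvCountP_eq_sum L (fun i => nameOf i == k)]
  have hone : ((L.filter (fun i => nameOf i == k)).map (fun _ => (1 : Int))).sum
      = (L.countP (fun i => nameOf i == k) : Int) := by
    rw [List.countP_eq_length_filter, PySem.List.sum_map_const_int]; ring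
  rw [hone]

-- ===== VERDICT (by name: the statement is the Claim_ definition above) =====
theorem count_trips_spec : Claim_equal_count_trips := by
  intro data zones _
  unfold Spec_count_trips
  simp only [count_trips, count_trips_alt]
  rw [pvA_loop_eq, pvB_loop_eq, ← PySem.Dict.counter_eq_foldl, PySem.Dict.items_counter]
  rw [pvDict_eq zones data]
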